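-- pv_equiv track=rewrite | github.com/roryscot/markov_chains | organized_without_prints.py | column_sorter
-- ===== SOURCE A (Python) =====
-- def column_sorter(m,m_prime,order):
--   #this depends on the number of terminals being right
--   new = []
--   for i in range(len(m)):
--     row = []
--     for j in range(len(m)):
--       row.append(m[i][order[j]])
--     new.append(row)
--   return new
-- ===== SOURCE B (Python) =====
-- def column_sorter(m, m_prime, order):
--     # Column-major reimplementation: transpose, pick whole columns, transpose back.
--     if not m:
--         return []
--     cols = list(zip(*m))
--     picked = [cols[order[j]] for j in range(len(m))]
--     return [list(t) for t in zip(*picked)]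
-- ===== Notes on version B (the rewrite author's own statement) =====
-- stated objective: idiomatic
-- what changed: B works column-major: it transposes m with zip(*m), selects whole columns by order, and transposes back, instead of A's nested element-by-element index loops.
-- outside the precondition, e.g. on column_sorter([[1, 2], [3]], [], [-1, 0]): A returns [[2, 1], [3, 3]], B returns [[1, 1], [3, 3]]
import Mathlib
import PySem

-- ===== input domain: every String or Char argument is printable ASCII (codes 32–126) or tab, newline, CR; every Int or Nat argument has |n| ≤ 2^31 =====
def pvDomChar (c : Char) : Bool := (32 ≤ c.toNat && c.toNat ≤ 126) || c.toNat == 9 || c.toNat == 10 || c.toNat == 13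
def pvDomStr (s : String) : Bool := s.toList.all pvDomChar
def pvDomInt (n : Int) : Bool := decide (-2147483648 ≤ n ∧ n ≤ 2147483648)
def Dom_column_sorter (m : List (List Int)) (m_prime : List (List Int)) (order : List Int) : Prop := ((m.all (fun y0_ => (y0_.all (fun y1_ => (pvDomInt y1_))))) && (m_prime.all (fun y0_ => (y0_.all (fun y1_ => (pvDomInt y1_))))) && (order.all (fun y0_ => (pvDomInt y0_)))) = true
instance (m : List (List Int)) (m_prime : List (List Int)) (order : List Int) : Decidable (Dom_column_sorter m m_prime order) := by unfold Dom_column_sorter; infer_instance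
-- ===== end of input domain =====

-- B reorders columns by transposing, picking whole columns, and transposing back (idiomatic, same cost).

-- ===== PORT A =====
-- literal transliteration of A's two nested index loops (pyGet? = Python indexing; Pre_ keeps it in range)
def column_sorter (m : List (List Int)) (m_prime : List (List Int)) (order : List Int) : List (List Int) :=
  (List.range m.length).foldl (fun new (i : Nat) =>
    new ++ [ (List.range m.length).foldl (fun row (j : Nat) =>
      row ++ [ (PySem.List.pyGet? (m.getD i []) ((PySem.List.pyGet? order (j : Int)).getD 0)).getD 0 ]) [] ]) []

-- ===== PORT B =====
-- zip(*rows): list of columns, truncated to the shortest row (exactly Python's zip)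
def pvMinLen (rows : List (List Int)) : Nat := ((rows.map List.length).min?).getD 0
def pvZipStar (rows : List (List Int)) : List (List Int) :=
  (List.range (pvMinLen rows)).map (fun k => rows.map (fun r => r.getD k 0))
def column_sorter_alt (m : List (List Int)) (m_prime : List (List Int)) (order : List Int) : List (List Int) :=
  match m with
  | [] => []
  | _ :: _ =>
    let cols := pvZipStar m
    let picked := (List.range m.length).map (fun (j : Nat) =>
      (PySem.List.pyGet? cols ((PySem.List.pyGet? order (j : Int)).getD 0)).getD [])
    pvZipStar picked

-- ===== PRECONDITION & SPEC =====
-- Pre_ excludes (a) inputs where A raises IndexError (order too short, or an order entry out of range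
-- for some row) and (b) ragged matrices indexed by a NEGATIVE order entry: there A's wraparound is
-- relative to each row's own length, an accident of its element-wise copying, while any column-major
-- treatment (B's) wraps relative to the common column count.
def Pre_column_sorter (m : List (List Int)) (m_prime : List (List Int)) (order : List Int) : Prop :=
  m.length ≤ order.length ∧
  ∀ j ∈ order.take m.length,
    (∀ r ∈ m, -(r.length : Int) ≤ j ∧ j < r.length) ∧
    (0 ≤ j ∨ ∀ r ∈ m, ∀ r' ∈ m, r.length = r'.length)
instance (m : List (List Int)) (m_prime : List (List Int)) (order : List Int) : Decidable (Pre_column_sorter m m_prime order) := by unfold Pre_column_sorter; infer_instance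
def pvWitness_column_sorter : List (List Int) × List (List Int) × List Int := ([[1, 2], [3, 4]], [], [1, 0])

def Spec_column_sorter (m : List (List Int)) (m_prime : List (List Int)) (order : List Int) (out : List (List Int)) : Prop := out = column_sorter_alt m m_prime order
instance (m : List (List Int)) (m_prime : List (List Int)) (order : List Int) (out : List (List Int)) : Decidable (Spec_column_sorter m m_prime order out) := by unfold Spec_column_sorter; infer_instance

-- ===== CLAIM (what is proved, stated in full; the proofs are below) =====
def Claim_equal_column_sorter : Prop := ∀ (m : List (List Int)) (m_prime : List (List Int)) (order : List Int), Dom_column_sorter m m_prime order → Pre_column_sorter m m_prime order → Spec_column_sorter m m_prime order (column_sorter m m_prime order)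

-- ===== LEMMAS AND PROOFS =====
-- normalized (Python) index, as a Nat
def pvNorm (len : Nat) (i : Int) : Nat := if i < 0 then len - (-i).toNat else i.toNat

lemma pyGet?_norm (xs : List Int) (i : Int) (d : Int)
    (h1 : -(xs.length : Int) ≤ i) (h2 : i < xs.length) :
    (PySem.List.pyGet? xs i).getD d = xs.getD (pvNorm xs.length i) d := by
  by_cases h : 0 ≤ i
  · simp [PySem.List.pyGet?, PySem.List.pyIdx?, h, h2, pvNorm, not_lt.mpr h]
  · simp [PySem.List.pyGet?, PySem.List.pyIdx?, h, h1, pvNorm, not_le.mp h]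

lemma pyGet?List_norm (xs : List (List Int)) (i : Int) (d : List Int)
    (h1 : -(xs.length : Int) ≤ i) (h2 : i < xs.length) :
    (PySem.List.pyGet? xs i).getD d = xs.getD (pvNorm xs.length i) d := by
  by_cases h : 0 ≤ i
  · simp [PySem.List.pyGet?, PySem.List.pyIdx?, h, h2, pvNorm, not_lt.mpr h]
  · simp [PySem.List.pyGet?, PySem.List.pyIdx?, h, h1, pvNorm, not_le.mp h]

lemma pvNorm_lt (len : Nat) (i : Int) (h1 : -(len : Int) ≤ i) (h2 : i < len) (h3 : 0 < len) :
    pvNorm len i < len := by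
  unfold pvNorm; split_ifs <;> omega

lemma pvMinLen_le {rows : List (List Int)} {r : List Int} (h : r ∈ rows) : pvMinLen rows ≤ r.length := by
  exact List.min?_getD_le_of_mem (List.mem_map_of_mem h)

lemma pvMinLen_const {rows : List (List Int)} (hne : rows ≠ []) {L : Nat}
    (h : ∀ r ∈ rows, r.length = L) : pvMinLen rows = L := by
  unfold pvMinLen
  rcases hmin : (rows.map List.length).min? with _ | v
  · rw [List.min?_eq_none_iff] at hmin
    exact absurd (List.map_eq_nil_iff.mp hmin) hne
  · have hv : v ∈ rows.map List.length := List.min?_mem hmin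
    simp only [List.mem_map] at hv
    obtain ⟨r, hr, hrv⟩ := hv
    simp [← hrv, h r hr]

lemma pvMinLen_gt {rows : List (List Int)} (hne : rows ≠ []) {c : Nat}
    (h : ∀ r ∈ rows, c < r.length) : c < pvMinLen rows := by
  unfold pvMinLen
  rcases hmin : (rows.map List.length).min? with _ | v
  · rw [List.min?_eq_none_iff] at hmin
    exact absurd (List.map_eq_nil_iff.mp hmin) hne
  · have hv : v ∈ rows.map List.length := List.min?_mem hmin
    simp only [List.mem_map] at hv
    obtain ⟨r, hr, hrv⟩ := hv
    simpa [← hrv] using h r hr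

lemma pvZipStar_length (rows : List (List Int)) : (pvZipStar rows).length = pvMinLen rows := by
  simp [pvZipStar]

lemma pvZipStar_getD (rows : List (List Int)) (k : Nat) (hk : k < pvMinLen rows) (d : List Int) :
    (pvZipStar rows).getD k d = rows.map (fun r => r.getD k 0) := by
  unfold pvZipStar
  rw [List.getD_eq_getElem _ _ (by simpa using hk)]
  simp

theorem column_sorter_spec : Claim_equal_column_sorter := by
  intro m m_prime order _ hpre
  obtain ⟨hlen, hidx⟩ := hpre
  unfold Spec_column_sorter
  rcases hm0 : m with _ | ⟨r0, rs⟩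
  · simp [column_sorter, column_sorter_alt]
  rw [← hm0]
  have hne : m ≠ [] := by rw [hm0]; simp
  have hnpos : 0 < m.length := List.length_pos_iff.mpr hne
  set n := m.length with hn
  -- order[j] for j < n is an ordinary in-range Nat lookup
  have horder : ∀ j : Nat, j < n → (PySem.List.pyGet? order (j : Int)).getD 0 = order.getD j 0 := by
    intro j hj
    rw [pyGet?_norm order j 0 (by omega) (by exact_mod_cast lt_of_lt_of_le hj hlen)]
    congr 1
  have hmemtake : ∀ j : Nat, j < n → order.getD j 0 ∈ order.take n := by
    intro j hj
    rw [List.getD_eq_getElem _ _ (lt_of_lt_of_le hj hlen)]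
    exact List.mem_take_iff_getElem.mpr ⟨j, by omega, rfl⟩
  -- A as a map of maps
  have hA : column_sorter m m_prime order =
      (List.range n).map (fun (i : Nat) => (List.range n).map (fun (j : Nat) =>
        (PySem.List.pyGet? (m.getD i []) ((PySem.List.pyGet? order (j : Int)).getD 0)).getD 0)) := by
    unfold column_sorter
    rw [PySem.List.foldl_append_singleton_eq_map _ _ [], List.nil_append, ← hn]
    refine List.map_congr_left fun i _ => ?_
    rw [PySem.List.foldl_append_singleton_eq_map _ _ [], List.nil_append]
  -- B unfolded (m is a cons, so the match reduces)
  have hB : column_sorter_alt m m_prime order =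
      pvZipStar ((List.range n).map (fun (j : Nat) =>
        (PySem.List.pyGet? (pvZipStar m) ((PySem.List.pyGet? order (j : Int)).getD 0)).getD [])) := by
    rw [hn, hm0]
    rfl
  -- what each picked column is
  have hcols_len : (pvZipStar m).length = pvMinLen m := pvZipStar_length m
  have hminpos : 0 < pvMinLen m := by
    refine pvMinLen_gt hne fun r hr => ?_
    have h1 := ((hidx _ (hmemtake 0 hnpos)).1 r hr).1
    have h2 := ((hidx _ (hmemtake 0 hnpos)).1 r hr).2
    omega
  have hpick : ∀ j : Nat, j < n →
      (PySem.List.pyGet? (pvZipStar m) ((PySem.List.pyGet? order (j : Int)).getD 0)).getD []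
        = m.map (fun r => r.getD (pvNorm (pvMinLen m) (order.getD j 0)) 0) := by
    intro j hj
    rw [horder j hj]
    obtain ⟨hrange, hsign⟩ := hidx _ (hmemtake j hj)
    have hr0 : r0 ∈ m := by rw [hm0]; exact List.mem_cons_self
    have hlb : -((pvZipStar m).length : Int) ≤ order.getD j 0 := by
      rw [hcols_len]
      rcases hsign with hpos | hrect
      · omega
      · have heq : pvMinLen m = r0.length :=
          pvMinLen_const hne (fun r hr => hrect r hr r0 hr0)
        have := (hrange r0 hr0).1
        omega
    have hub : order.getD j 0 < ((pvZipStar m).length : Int) := by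
      rw [hcols_len]
      by_cases hneg : order.getD j 0 < 0
      · have := pvMinLen_le hr0
        have := (hrange r0 hr0).2
        omega
      · have : (order.getD j 0).toNat < pvMinLen m := by
          refine pvMinLen_gt hne fun r hr => ?_
          have := (hrange r hr).2
          omega
        omega
    rw [pyGet?List_norm _ _ _ hlb hub, hcols_len]
    exact pvZipStar_getD m _ (pvNorm_lt _ _ (by rw [hcols_len] at hlb; exact_mod_cast hlb)
      (by rw [hcols_len] at hub; exact_mod_cast hub) hminpos) []
  -- assemble
  rw [hA, hB]
  have hpicked : (List.range n).map (fun (j : Nat) =>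
        (PySem.List.pyGet? (pvZipStar m) ((PySem.List.pyGet? order (j : Int)).getD 0)).getD [])
      = (List.range n).map (fun (j : Nat) =>
        m.map (fun r => r.getD (pvNorm (pvMinLen m) (order.getD j 0)) 0)) := by
    refine List.map_congr_left fun j hj => hpick j (List.mem_range.mp hj)
  rw [hpicked]
  -- pvZipStar of the picked columns
  have hplen : ∀ c ∈ (List.range n).map (fun (j : Nat) =>
        m.map (fun r => r.getD (pvNorm (pvMinLen m) (order.getD j 0)) 0)), c.length = n := by
    intro c hc
    obtain ⟨j, _, rfl⟩ := List.mem_map.mp hc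
    simp [hn]
  have hpmin : pvMinLen ((List.range n).map (fun (j : Nat) =>
        m.map (fun r => r.getD (pvNorm (pvMinLen m) (order.getD j 0)) 0))) = n :=
    pvMinLen_const (by simp; omega) hplen
  unfold pvZipStar
  rw [hpmin]
  refine List.map_congr_left fun i hi => ?_
  rw [List.map_map]
  refine List.map_congr_left fun j hj => ?_
  replace hi := List.mem_range.mp hi
  replace hj := List.mem_range.mp hj
  -- entrywise equality
  rw [horder j hj]
  obtain ⟨hrange, hsign⟩ := hidx _ (hmemtake j hj)
  have hrowmem : m.getD i [] ∈ m := by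
    rw [List.getD_eq_getElem _ _ hi]
    exact List.getElem_mem _
  obtain ⟨h1, h2⟩ := hrange _ hrowmem
  rw [pyGet?_norm _ _ _ h1 h2]
  -- (map f m).getD i 0 = f (m.getD i [])
  have hmapgetD : ((List.map (fun r => r.getD (pvNorm (pvMinLen m) (order.getD j 0)) 0) m).getD i 0)
      = (m.getD i []).getD (pvNorm (pvMinLen m) (order.getD j 0)) 0 := by
    rw [List.getD_eq_getElem _ _ (by simpa using hi), List.getElem_map,
      List.getD_eq_getElem _ _ hi]
  rw [Function.comp_apply, hmapgetD]
  -- pvNorm agrees: same for nonnegative, and rectangular when negative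
  have hnorm : pvNorm (pvMinLen m) (order.getD j 0) = pvNorm (m.getD i []).length (order.getD j 0) := by
    rcases hsign with hpos | hrect
    · unfold pvNorm
      rw [if_neg (by omega), if_neg (by omega)]
    · rw [pvMinLen_const hne (fun r hr => hrect r hr _ hrowmem)]
  rw [hnorm]
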